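-- pv_equiv track=rewrite | github.com/metamemelord/Hackerrank-Solutions | Strings/pangrams.py | check
-- ===== SOURCE A (Python) =====
-- def check(s):
-- 	m = 'abcdefghijklmnopqrstuvwxyz'
-- 	i = 0
-- 	j = 0
-- 	while(i<26  and j<len(s)):
-- 		if(s[j] == m[i]):
-- 			i += 1
-- 		j+=1
-- 	if(i==26):
-- 		return True
-- 	else:
-- 		return False
-- ===== SOURCE B (Python) =====
-- def check(s):
--     # Build an inverted index: letter -> sorted list of its positions in s (one pass).
--     occ = {}
--     for i, ch in enumerate(s):
--         occ.setdefault(ch, []).append(i)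
--     # Then walk the alphabet, binary-searching each letter's position list for the
--     # first occurrence at or after the cursor.
--     pos = 0
--     for c in 'abcdefghijklmnopqrstuvwxyz':
--         lst = occ.get(c)
--         if lst is None:
--             return False
--         lo, hi = 0, len(lst)
--         while lo < hi:
--             mid = (lo + hi) // 2
--             if lst[mid] < pos:
--                 lo = mid + 1
--             else:
--                 hi = mid
--         if lo == len(lst):
--             return False
--         pos = lst[lo] + 1
--     return True
-- ===== Notes on version B (the rewrite author's own statement) =====
-- stated objective: alternative
-- what changed: Instead of A's single left-to-right scan with an alphabet cursor, B builds an inverted index (letter -> sorted list of positions) in one pass and then, for each of the 26 letters in order, binary-searches that letter's position list for the first occurrence at or after the cursor.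
import Mathlib
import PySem

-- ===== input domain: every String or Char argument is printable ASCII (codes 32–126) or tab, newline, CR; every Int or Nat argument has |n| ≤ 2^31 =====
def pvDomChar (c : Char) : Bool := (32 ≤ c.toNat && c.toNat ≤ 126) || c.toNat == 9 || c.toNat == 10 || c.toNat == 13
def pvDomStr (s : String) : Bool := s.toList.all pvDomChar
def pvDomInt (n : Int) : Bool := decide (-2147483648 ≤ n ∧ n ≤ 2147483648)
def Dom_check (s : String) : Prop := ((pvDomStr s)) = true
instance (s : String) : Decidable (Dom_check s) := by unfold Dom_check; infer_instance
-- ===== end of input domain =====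

-- Both programs decide whether 'abcdefghijklmnopqrstuvwxyz' occurs in order in s; A scans s once
-- with an alphabet cursor, B builds an inverted index (letter -> position list) and binary-searches it.


-- ===== PORT A =====
-- m = 'abcdefghijklmnopqrstuvwxyz'
def pvAlpha : List Char := "abcdefghijklmnopqrstuvwxyz".toList

-- the while loop: j advances along s (structural recursion), i is the alphabet cursor;
-- the loop exits as soon as i = 26 or s is exhausted, and the result is the final i
def checkGo (cs : List Char) (i : Nat) : Nat :=
  match cs with
  | [] => i
  | c :: rest =>
    if i < 26 then
      if c = pvAlpha.getD i ' ' then checkGo rest (i + 1) else checkGo rest i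
    else i

def check (s : String) : Bool :=
  if checkGo s.toList 0 = 26 then true else false

-- ===== PORT B =====
-- the index-building pass: for i, ch in enumerate(s): occ.setdefault(ch, []).append(i)
def buildOcc (cs : List Char) : PySem.Dict Char (List Int) :=
  (PySem.List.enumerate cs).foldl (fun d p => d.modify p.2 [] (· ++ [p.1])) PySem.Dict.empty

-- the hand-written binary search: while lo < hi: mid = (lo+hi)//2; …
-- (lst[mid] is ported as getD mid 0: exact, since lo < hi ≤ len(lst) throughout)
def lowerBound (lst : List Int) (pos : Int) (lo hi : Nat) : Nat :=
  if h : lo < hi then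
    let mid := (lo + hi) / 2
    if lst.getD mid 0 < pos then lowerBound lst pos (mid + 1) hi
    else lowerBound lst pos lo mid
  else lo
termination_by hi - lo
decreasing_by all_goals omega

-- the for-loop over the alphabet: lst = occ.get(c) (None -> False), binary search, cursor = lst[lo] + 1
def altGo (occ : PySem.Dict Char (List Int)) (letters : List Char) (pos : Int) : Bool :=
  match letters with
  | [] => true
  | c :: rest =>
    match occ.get? c with
    | none => false
    | some lst =>
      let lo := lowerBound lst pos 0 lst.length
      if lo = lst.length then false
      else altGo occ rest (lst.getD lo 0 + 1)

def check_alt (s : String) : Bool := altGo (buildOcc s.toList) pvAlpha 0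

-- ===== PRECONDITION & SPEC =====
def Spec_check (s : String) (out : Bool) : Prop := out = check_alt s
instance (s : String) (out : Bool) : Decidable (Spec_check s out) := by unfold Spec_check; infer_instance

-- ===== CLAIM (what is proved, stated in full; the proofs are below) =====
def Claim_equal_check : Prop := ∀ (s : String), Dom_check s → Spec_check s (check s)

-- ===== LEMMAS AND PROOFS =====

-- common specification: greedy subsequence test
def subseqAux : List Char → List Char → Bool
  | [], _ => true
  | _ :: _, [] => false
  | a :: as, b :: bs => if a = b then subseqAux as bs else subseqAux (a :: as) bs

theorem subseqAux_nil_right (a : Char) (as : List Char) : subseqAux (a :: as) [] = false := rfl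

theorem subseqAux_not_mem (c : Char) (rest l : List Char) (h : c ∉ l) :
    subseqAux (c :: rest) l = false := by
  induction l with
  | nil => rfl
  | cons b bs ih =>
    have hb : c ≠ b := fun hc => h (hc ▸ List.mem_cons_self)
    simp only [subseqAux, if_neg hb]
    exact ih (fun hm => h (List.mem_cons_of_mem _ hm))

theorem subseqAux_skip (c : Char) (rest l₁ l₂ : List Char) (h : c ∉ l₁) :
    subseqAux (c :: rest) (l₁ ++ l₂) = subseqAux (c :: rest) l₂ := by
  induction l₁ with
  | nil => rfl
  | cons b bs ih =>
    have hb : c ≠ b := fun hc => h (hc ▸ List.mem_cons_self)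
    simp only [List.cons_append, subseqAux, if_neg hb]
    exact ih (fun hm => h (List.mem_cons_of_mem _ hm))

theorem mem_take_exists_getElem (c : Char) (l : List Char) (n : Nat) (h : c ∈ l.take n) :
    ∃ j, j < n ∧ ∃ hj : j < l.length, l[j] = c := by
  obtain ⟨j, hj, hget⟩ := List.getElem_of_mem h
  have hlen : j < min n l.length := by simpa using hj
  exact ⟨j, lt_of_lt_of_le hlen (min_le_left _ _),
    lt_of_lt_of_le hlen (min_le_right _ _), by
      rw [← hget]; exact (List.getElem_take).symm⟩

theorem drop_eq_cons_of_getElem (l : List Char) (k : Nat) (hk : k < l.length) :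
    l.drop k = l[k] :: l.drop (k + 1) := (List.getElem_cons_drop hk).symm

-- A's loop computes the greedy subsequence test against the remaining alphabet
theorem checkGo_eq_subseqAux (cs : List Char) (i : Nat) (hi : i ≤ 26) :
    (checkGo cs i = 26) ↔ subseqAux (pvAlpha.drop i) cs = true := by
  induction cs generalizing i with
  | nil =>
    simp only [checkGo]
    rcases Nat.lt_or_eq_of_le hi with h | h
    · have hd : i < pvAlpha.length := by simp only [pvAlpha]; simpa using h
      rw [← List.getElem_cons_drop hd, subseqAux_nil_right]
      simp only [Bool.false_eq_true, iff_false]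
      omega
    · subst h; simp [pvAlpha, subseqAux]
  | cons c rest ih =>
    simp only [checkGo]
    by_cases h : i < 26
    · have hd : i < pvAlpha.length := by simp only [pvAlpha]; simpa using h
      rw [if_pos h, ← List.getElem_cons_drop hd]
      have hget : pvAlpha.getD i ' ' = pvAlpha[i] := List.getD_eq_getElem _ _ hd
      by_cases hc : c = pvAlpha[i]
      · rw [if_pos (hget ▸ hc)]
        simp only [subseqAux, if_pos hc.symm]
        exact ih (i + 1) (by omega)
      · rw [if_neg (hget ▸ hc)]
        have hne : pvAlpha[i] ≠ c := fun he => hc he.symm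
        simp only [subseqAux, if_neg hne]
        rw [List.getElem_cons_drop hd]
        exact ih i hi
    · have : i = 26 := by omega
      subst this
      simp [pvAlpha, subseqAux]

-- the per-letter occurrence list the index assigns
def occList (cs : List Char) (c : Char) : List Int :=
  ((PySem.List.enumerate cs).filter (fun p => p.2 == c)).map (·.1)

theorem buildOcc_getD (cs : List Char) (c : Char) :
    (buildOcc cs).getD c [] = occList cs c := by
  unfold buildOcc occList
  rw [show ((PySem.List.enumerate cs).foldl (fun d p => d.modify p.2 [] (· ++ [p.1])) PySem.Dict.empty)
      = (((PySem.List.enumerate cs).map (fun p => (p.2, p.1))).foldl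
          (fun d p => d.modify p.1 [] (· ++ [p.2])) PySem.Dict.empty) from (List.foldl_map ..).symm ▸ rfl]
  rw [PySem.Dict.getD_foldl_modify_append]
  simp [List.filter_map, List.map_map, Function.comp_def]

theorem occList_mem (cs : List Char) (c : Char) (k : Int) :
    k ∈ occList cs c ↔ ∃ (j : Nat) (hj : j < cs.length), k = (j : Int) ∧ cs[j] = c := by
  unfold occList
  simp only [List.mem_map, List.mem_filter]
  constructor
  · rintro ⟨p, ⟨hpm, hpc⟩, hk⟩
    obtain ⟨j, hj, rfl⟩ := (PySem.List.mem_enumerate_iff ..).mp hpm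
    simp only [beq_iff_eq] at hpc
    exact ⟨j, hj, by simpa using hk.symm, hpc⟩
  · rintro ⟨j, hj, rfl, hc⟩
    exact ⟨((j : Int), cs[j]), ⟨(PySem.List.mem_enumerate_iff ..).mpr ⟨j, hj, by simp⟩,
      by simpa using hc⟩, rfl⟩

theorem occList_pairwise (cs : List Char) (c : Char) :
    (occList cs c).Pairwise (· < ·) := by
  unfold occList
  exact List.pairwise_map.mpr (((PySem.List.pairwise_lt_enumerate cs 0).filter _))

-- binary-search correctness: result r with lo ≤ r ≤ hi separates < pos from ≥ pos
theorem lowerBound_spec (lst : List Int) (pos : Int) (lo hi : Nat)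
    (hhi : hi ≤ lst.length)
    (hmono : ∀ p q : Nat, p ≤ q → q < lst.length → lst.getD p 0 ≤ lst.getD q 0)
    (hlo : ∀ j < lo, lst.getD j 0 < pos)
    (hge : ∀ j, hi ≤ j → j < lst.length → pos ≤ lst.getD j 0)
    (hle : lo ≤ hi) :
    lo ≤ lowerBound lst pos lo hi ∧ lowerBound lst pos lo hi ≤ hi ∧
      (∀ j < lowerBound lst pos lo hi, lst.getD j 0 < pos) ∧
      (∀ j, lowerBound lst pos lo hi ≤ j → j < lst.length → pos ≤ lst.getD j 0) := by
  fun_induction lowerBound lst pos lo hi with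
  | case1 lo hi h mid hlt ih =>
    have hmid : mid < lst.length := by omega
    obtain ⟨h1, h2, h3, h4⟩ := ih (by omega)
      (fun j hj => lt_of_le_of_lt (hmono j mid (by omega) hmid) hlt) hge (by omega)
    exact ⟨by omega, h2, h3, h4⟩
  | case2 lo hi h mid hlt ih =>
    have hmid : mid < lst.length := by omega
    rw [not_lt] at hlt
    obtain ⟨h1, h2, h3, h4⟩ := ih (by omega) hlo
      (fun j hj hjl => le_trans hlt (hmono mid j hj hjl)) (by omega)
    exact ⟨h1, by omega, h3, h4⟩
  | case3 lo hi h =>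
    exact ⟨le_refl _, by omega, hlo, fun j hj hjl => hge j (by omega) hjl⟩

-- B's loop computes the greedy subsequence test on the suffix from the cursor
theorem altGo_eq_subseqAux (cs : List Char) (letters : List Char) (pos : Int)
    (hp : 0 ≤ pos) :
    altGo (buildOcc cs) letters pos = subseqAux letters (cs.drop pos.toNat) := by
  induction letters generalizing pos with
  | nil => simp [altGo, subseqAux]
  | cons c rest ih =>
    simp only [altGo]
    cases hocc : (buildOcc cs).get? c with
    | none =>
      have hempty : occList cs c = [] := by
        rw [← buildOcc_getD]; exact PySem.Dict.getD_of_get?_eq_none _ _ hocc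
      have hnm : c ∉ cs.drop pos.toNat := by
        intro hm
        obtain ⟨j, hj, hget⟩ := List.getElem_of_mem hm
        rw [List.getElem_drop] at hget
        have hjl : pos.toNat + j < cs.length := by simp at hj; omega
        have hk : ((pos.toNat + j : Nat) : Int) ∈ occList cs c :=
          (occList_mem cs c _).mpr ⟨pos.toNat + j, hjl, rfl, hget⟩
        rw [hempty] at hk
        exact absurd hk (List.not_mem_nil)
      exact (subseqAux_not_mem c rest _ hnm).symm
    | some lst =>
      dsimp only
      have hlst : lst = occList cs c := by
        rw [← buildOcc_getD]; exact (PySem.Dict.getD_of_get?_eq_some _ _ hocc).symm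
      have hpw : lst.Pairwise (· < ·) := hlst ▸ occList_pairwise cs c
      have hmono : ∀ p q : Nat, p ≤ q → q < lst.length → lst.getD p 0 ≤ lst.getD q 0 := by
        intro p q hpq hq
        rcases Nat.lt_or_eq_of_le hpq with hlt | rfl
        · rw [List.getD_eq_getElem _ _ (by omega), List.getD_eq_getElem _ _ hq]
          exact le_of_lt (List.pairwise_iff_getElem.mp hpw p q (by omega) hq hlt)
        · exact le_refl _
      obtain ⟨-, hrle, hlt, hgepos⟩ := lowerBound_spec lst pos 0 lst.length (le_refl _)
        hmono (by omega) (fun j h1 h2 => absurd h1 (by omega)) (Nat.zero_le _)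
      by_cases hre : lowerBound lst pos 0 lst.length = lst.length
      · rw [if_pos hre]
        have hnm : c ∉ cs.drop pos.toNat := by
          intro hm
          obtain ⟨j, hj, hget⟩ := List.getElem_of_mem hm
          rw [List.getElem_drop] at hget
          have hjl : pos.toNat + j < cs.length := by simp at hj; omega
          have hk : ((pos.toNat + j : Nat) : Int) ∈ lst := by
            rw [hlst]; exact (occList_mem cs c _).mpr ⟨pos.toNat + j, hjl, rfl, hget⟩
          obtain ⟨i, hi, hie⟩ := List.getElem_of_mem hk
          have hip := hlt i (by omega)
          rw [List.getD_eq_getElem _ _ hi, hie] at hip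
          omega
        exact (subseqAux_not_mem c rest _ hnm).symm
      · rw [if_neg hre]
        have hrlen : lowerBound lst pos 0 lst.length < lst.length := by omega
        have hkget : lst.getD (lowerBound lst pos 0 lst.length) 0
            = lst[lowerBound lst pos 0 lst.length] := List.getD_eq_getElem _ _ hrlen
        have hkmem : lst.getD (lowerBound lst pos 0 lst.length) 0 ∈ lst := by
          rw [hkget]; exact List.getElem_mem _
        have hkmem' : lst.getD (lowerBound lst pos 0 lst.length) 0 ∈ occList cs c := by
          rw [← hlst]; exact hkmem
        obtain ⟨kn, hkn, hkeq, hkc⟩ := (occList_mem cs c _).mp hkmem'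
        have hkpos : pos ≤ lst.getD (lowerBound lst pos 0 lst.length) 0 :=
          hgepos _ (le_refl _) hrlen
        have hpn : pos.toNat ≤ kn := by omega
        have hmin : ∀ j : Nat, pos.toNat ≤ j → ∀ hjl : j < cs.length, cs[j] = c → kn ≤ j := by
          intro j h1 h2 h3
          have hjm : ((j : Nat) : Int) ∈ lst := by
            rw [hlst]; exact (occList_mem cs c _).mpr ⟨j, h2, rfl, h3⟩
          obtain ⟨i, hi, hie⟩ := List.getElem_of_mem hjm
          by_cases hir : i < lowerBound lst pos 0 lst.length
          · have hip := hlt i hir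
            rw [List.getD_eq_getElem _ _ hi, hie] at hip
            omega
          · have hle2 := hmono (lowerBound lst pos 0 lst.length) i (by omega) hi
            rw [hkeq, List.getD_eq_getElem _ _ hi, hie] at hle2
            omega
        have hsplit : cs.drop pos.toNat
            = (cs.drop pos.toNat).take (kn - pos.toNat) ++ (c :: cs.drop (kn + 1)) := by
          conv_lhs => rw [← List.take_append_drop (kn - pos.toNat) (cs.drop pos.toNat)]
          rw [List.drop_drop, show pos.toNat + (kn - pos.toNat) = kn from by omega,
            drop_eq_cons_of_getElem cs kn hkn, hkc]
        have hfree : c ∉ (cs.drop pos.toNat).take (kn - pos.toNat) := by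
          intro hm
          obtain ⟨j, hjlt, hjl, hget⟩ := mem_take_exists_getElem c _ _ hm
          rw [List.getElem_drop] at hget
          have hlen2 : pos.toNat + j < cs.length := by simp at hjl; omega
          have := hmin _ (by omega) hlen2 hget
          omega
        rw [hsplit, subseqAux_skip c rest _ _ hfree]
        simp only [subseqAux]
        have htn : (lst.getD (lowerBound lst pos 0 lst.length) 0 + 1).toNat = kn + 1 := by omega
        rw [ih _ (by omega), htn]
        simp

-- ===== VERDICT (by name: the statement is the Claim_ definition above) =====
theorem check_spec : Claim_equal_check := by
  intro s _
  unfold Spec_check check check_alt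
  rw [altGo_eq_subseqAux s.toList pvAlpha 0 (by norm_num)]
  have h := checkGo_eq_subseqAux s.toList 0 (by omega)
  rw [List.drop_zero] at h
  simp only [Int.toNat_zero, List.drop_zero]
  by_cases hc : checkGo s.toList 0 = 26
  · rw [if_pos hc]; exact (h.mp hc).symm
  · rw [if_neg hc]
    have hne := (not_iff_not.mpr h).mp hc
    simp only [Bool.not_eq_true] at hne
    exact hne.symm
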